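-- pv_equiv track=rewrite | github.com/sunny0910/Data-Structures-Algorithms | strings/largest_number_smaller_than_n.py | largestNumberSmallerThanN
-- ===== SOURCE A (Python) =====
-- def largestNumberSmallerThanN(n):
--     """
--     Function to get largest number smaller than N with same set of digits
--     :param n: Int
--     :return: Int
--     """
--     n = [int(d) for d in str(n)]
--     possible = False
--     for i in range(len(n)-1, 0, -1):
--         if n[i-1] > n[i]:
--             possible = True
--             break
--     if not possible:
--         return -1
--     largest_index = i
--     for j in range(i, len(n)):
--         if n[i-1] > n[j] > n[largest_index]:
--             largest_index = j
--     n[largest_index], n[i-1] = n[i-1], n[largest_index]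
--     n1 = n[:i]
--     n2 = n[i:]
--     n2.sort(reverse=True)
--     n = n1+n2
--     return int("".join(map(str,n)))
-- ===== SOURCE B (Python) =====
-- def _prev_perm(l):
--     """Previous lexicographic permutation of the digit list l, or None if l is minimal."""
--     if len(l) < 2:
--         return None
--     t = _prev_perm(l[1:])
--     if t is not None:
--         return [l[0]] + t
--     # l[1:] is the minimal arrangement of its digits: decrease at position 0 if possible
--     smaller = [x for x in l[1:] if x < l[0]]
--     if not smaller:
--         return None
--     m = max(smaller)
--     rest = l[1:]
--     rest.remove(m)
--     return [m] + sorted(rest + [l[0]], reverse=True)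
--
--
-- def largestNumberSmallerThanN(n):
--     digits = [int(d) for d in str(n)]
--     p = _prev_perm(digits)
--     if p is None:
--         return -1
--     return int("".join(map(str, p)))
-- ===== Notes on version B (the rewrite author's own statement) =====
-- stated objective: alternative
-- what changed: Replaces A's index-based in-place machinery (countdown pivot scan over range(len-1,0,-1), largest_index scan, swap by simultaneous assignment, slice + reverse-sort) by a structural recursion on the digit list that computes the previous lexicographic permutation: recurse on the tail, and at the base (tail minimal) replace the head by the largest smaller digit and sort the remaining digits descending.
import Mathlib
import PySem

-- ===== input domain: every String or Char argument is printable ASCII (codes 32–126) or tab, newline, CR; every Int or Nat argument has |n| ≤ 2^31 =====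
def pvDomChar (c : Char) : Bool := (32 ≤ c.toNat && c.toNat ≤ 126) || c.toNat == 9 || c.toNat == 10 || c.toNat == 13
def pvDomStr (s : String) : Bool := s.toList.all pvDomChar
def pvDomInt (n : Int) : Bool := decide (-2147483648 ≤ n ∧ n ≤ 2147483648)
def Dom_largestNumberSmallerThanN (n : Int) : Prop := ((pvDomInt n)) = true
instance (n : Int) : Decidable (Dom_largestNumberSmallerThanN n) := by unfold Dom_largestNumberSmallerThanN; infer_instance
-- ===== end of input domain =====

-- B replaces A's index-based pivot/swap/sort loops by a structural recursion on the digit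
-- list computing the previous permutation (objective: alternative decomposition, same cost).

-- ===== PORT A =====

-- n[i] for a nonnegative in-range index (all indices A uses are such)
def pvGet (d : List Int) (i : Int) : Int := PySem.List.pyGetD d i 0

-- [int(c) for c in str(n)]; the .getD 0 branch is unreachable under Pre_ (digits only)
def pvDigits (n : Int) : List Int :=
  (PySem.Int.toChars n).map (fun c => (PySem.Int.ofChars? [c]).getD 0)

-- int("".join(map(str, l))); the .getD 0 branch is unreachable (digit lists only)
def pvJoinInt (l : List Int) : Int :=
  (PySem.Int.ofChars? (PySem.Chars.join [] (l.map PySem.Int.toChars))).getD 0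

-- the first 'for' loop of A: scan the countdown range, break at the first descent
def pvFindPivotA (d : List Int) : List Int → Option Int
  | [] => none
  | i :: r => if pvGet d (i - 1) > pvGet d i then some i else pvFindPivotA d r

-- the 'largest_index' loop of A (local variable largest_index, scanned over range(i, len(n)))
def pvLargestIndex (d : List Int) (i : Int) : Int :=
  (PySem.List.pyRange i (PySem.List.len d) 1).foldl
    (fun li j => if pvGet d (i - 1) > pvGet d j ∧ pvGet d j > pvGet d li then j else li) i

-- A's simultaneous swap n[largest_index], n[i-1] = n[i-1], n[largest_index]
def pvSwapped (d : List Int) (i : Int) : List Int :=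
  PySem.List.pySetD (PySem.List.pySetD d (pvLargestIndex d i) (pvGet d (i - 1))) (i - 1)
    (pvGet d (pvLargestIndex d i))

-- A's code after the break at pivot i: swap, slices n[:i] / n[i:], reverse sort, concatenate
def pvAconstruct (d : List Int) (i : Int) : List Int :=
  PySem.List.slice (pvSwapped d i) none (some i) ++
    PySem.List.sorted (PySem.List.slice (pvSwapped d i) (some i) none) (fun x => x) true

def largestNumberSmallerThanN (n : Int) : Int :=
  let d := pvDigits n
  match pvFindPivotA d (PySem.List.pyRange (PySem.List.len d - 1) 0 (-1)) with
  | none => -1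
  | some i => pvJoinInt (pvAconstruct d i)

-- ===== PORT B =====

-- _prev_perm from Source B: previous lexicographic permutation of the list, or none if minimal
def pvPrevPerm : List Int → Option (List Int)
  | [] => none
  | [_] => none
  | a :: b :: t =>
    match pvPrevPerm (b :: t) with
    | some p => some (a :: p)
    | none =>
      let smaller := (b :: t).filter (fun x => decide (x < a))
      match PySem.List.max? smaller (fun x => x) with
      | none => none
      | some m =>
        some (m :: PySem.List.sorted
          (((PySem.List.remove? (b :: t) m).getD (b :: t)) ++ [a]) (fun x => x) true)

def largestNumberSmallerThanN_alt (n : Int) : Int :=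
  match pvPrevPerm (pvDigits n) with
  | none => -1
  | some p => pvJoinInt p

-- ===== PRECONDITION & SPEC =====
-- A raises ValueError on n < 0 (the '-' sign character reaches int(d)); B raises there too.
def Pre_largestNumberSmallerThanN (n : Int) : Prop := 0 ≤ n
instance (n : Int) : Decidable (Pre_largestNumberSmallerThanN n) := by
  unfold Pre_largestNumberSmallerThanN; infer_instance

def pvWitness_largestNumberSmallerThanN : Int := 21

def Spec_largestNumberSmallerThanN (n : Int) (out : Int) : Prop := out = largestNumberSmallerThanN_alt n
instance (n : Int) (out : Int) : Decidable (Spec_largestNumberSmallerThanN n out) := by unfold Spec_largestNumberSmallerThanN; infer_instance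

-- ===== CLAIM (what is proved, stated in full; the proofs are below) =====
def Claim_equal_largestNumberSmallerThanN : Prop := ∀ (n : Int), Dom_largestNumberSmallerThanN n → Pre_largestNumberSmallerThanN n → Spec_largestNumberSmallerThanN n (largestNumberSmallerThanN n)

-- ===== LEMMAS AND PROOFS =====

theorem pvGet_zero_cons (x : Int) (l : List Int) : pvGet (x :: l) 0 = x := by
  simp [pvGet, PySem.List.pyGetD_zero_cons]

theorem pvGet_cons (c : Int) (d : List Int) (x : Int) (h : 0 ≤ x) :
    pvGet (c :: d) (x + 1) = pvGet d x := by
  obtain ⟨k, rfl⟩ := Int.eq_ofNat_of_zero_le h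
  have h1 : ((k : Int) + 1) = ((k + 1 : Nat) : Int) := by push_cast; ring
  rw [pvGet, pvGet, h1, PySem.List.pyGetD_natCast, PySem.List.pyGetD_natCast]
  simp [List.getD]

theorem pvGet_one_cons (a b : Int) (t : List Int) : pvGet (a :: b :: t) 1 = b := by
  have := pvGet_cons a (b :: t) 0 le_rfl
  norm_num at this
  rw [this, pvGet_zero_cons]

theorem pvLen_cons (c : Int) (d : List Int) :
    PySem.List.len (c :: d) = PySem.List.len d + 1 := by
  simp [PySem.List.len_eq]

theorem pvFindPivotA_append_some (d r1 r2 : List Int) (i : Int)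
    (h : pvFindPivotA d r1 = some i) : pvFindPivotA d (r1 ++ r2) = some i := by
  induction r1 with
  | nil => simp [pvFindPivotA] at h
  | cons x r ih =>
    rw [List.cons_append, pvFindPivotA]
    rw [pvFindPivotA] at h
    split_ifs with hc
    · rw [if_pos hc] at h; exact h
    · rw [if_neg hc] at h; exact ih h

theorem pvFindPivotA_append_none (d r1 r2 : List Int)
    (h : pvFindPivotA d r1 = none) : pvFindPivotA d (r1 ++ r2) = pvFindPivotA d r2 := by
  induction r1 with
  | nil => simp
  | cons x r ih =>
    rw [List.cons_append, pvFindPivotA]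
    rw [pvFindPivotA] at h
    split_ifs with hc
    · rw [if_pos hc] at h; exact absurd h (by simp)
    · rw [if_neg hc] at h; exact ih h

theorem pvFindPivotA_none_iff (d r : List Int) :
    pvFindPivotA d r = none ↔ ∀ i ∈ r, ¬ pvGet d (i - 1) > pvGet d i := by
  induction r with
  | nil => simp [pvFindPivotA]
  | cons x r ih =>
    rw [pvFindPivotA]
    split_ifs with hc
    · simp only [List.mem_cons]
      constructor
      · intro h; exact absurd h (by simp)
      · intro h; exact absurd hc (h x (Or.inl rfl))
    · simp only [List.mem_cons, ih]
      constructor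
      · intro h i hi
        rcases hi with rfl | hi
        · exact hc
        · exact h i hi
      · intro h i hi; exact h i (Or.inr hi)

theorem pvFindPivotA_mem (d r : List Int) (i : Int)
    (h : pvFindPivotA d r = some i) : i ∈ r := by
  induction r with
  | nil => simp [pvFindPivotA] at h
  | cons x r ih =>
    rw [pvFindPivotA] at h
    split_ifs at h with hc
    · simp at h; simp [h]
    · exact List.mem_cons_of_mem _ (ih h)

theorem pvFindPivotA_map_shift (c : Int) (d : List Int) (r : List Int)
    (hr : ∀ x ∈ r, (1 : Int) ≤ x) :
    pvFindPivotA (c :: d) (r.map (· + 1)) = (pvFindPivotA d r).map (· + 1) := by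
  induction r with
  | nil => rfl
  | cons x r ih =>
    have hx : (1 : Int) ≤ x := hr x (List.mem_cons_self ..)
    have e1 : pvGet (c :: d) (x + 1 - 1) = pvGet d (x - 1) := by
      have : x + 1 - 1 = (x - 1) + 1 := by ring
      rw [this, pvGet_cons c d (x - 1) (by omega)]
    have e2 : pvGet (c :: d) (x + 1) = pvGet d x := pvGet_cons c d x (by omega)
    rw [List.map_cons, pvFindPivotA, pvFindPivotA, e1, e2]
    split_ifs with hc
    · rfl
    · exact ih (fun y hy => hr y (List.mem_cons_of_mem _ hy))

theorem pvRange_countdown (m : Nat) :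
    PySem.List.pyRange ((m : Int) + 1) 0 (-1)
      = ((PySem.List.pyRange (m : Int) 0 (-1)).map (· + 1)) ++ [1] := by
  rw [PySem.List.pyRange_neg_one, PySem.List.pyRange_neg_one]
  rw [show ((m : Int) + 1 - 0).toNat = m + 1 by omega, show ((m : Int) - 0).toNat = m by omega]
  rw [List.range_succ, List.map_append, List.map_map]
  congr 1
  · apply List.map_congr_left
    intro k _
    simp only [Function.comp_apply]
    ring
  · simp

theorem pvRange_shift (j x : Int) :
    PySem.List.pyRange (j + 1) (x + 1) 1 = (PySem.List.pyRange j x 1).map (· + 1) := by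
  rw [PySem.List.pyRange_one, PySem.List.pyRange_one, List.map_map]
  rw [show x + 1 - (j + 1) = x - j by omega]
  apply List.map_congr_left
  intro k _
  simp only [Function.comp_apply]
  ring

theorem pvPivotCons_some (a b : Int) (t : List Int) (j : Int)
    (hj : pvFindPivotA (b :: t) (PySem.List.pyRange (PySem.List.len (b :: t) - 1) 0 (-1))
            = some j) :
    pvFindPivotA (a :: b :: t) (PySem.List.pyRange (PySem.List.len (a :: b :: t) - 1) 0 (-1))
      = some (j + 1) := by
  have hL1 : PySem.List.len (a :: b :: t) - 1 = ((t.length : Int)) + 1 := by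
    simp only [PySem.List.len_eq, List.length_cons]; omega
  have hL2 : PySem.List.len (b :: t) - 1 = (t.length : Int) := by
    simp [PySem.List.len_eq]
  rw [hL1, pvRange_countdown t.length]
  rw [hL2] at hj
  apply pvFindPivotA_append_some
  rw [pvFindPivotA_map_shift a (b :: t) _
    (fun x hx => by rw [PySem.List.mem_pyRange_neg_one] at hx; omega), hj]
  rfl

theorem pvPivotCons_none (a b : Int) (t : List Int)
    (hj : pvFindPivotA (b :: t) (PySem.List.pyRange (PySem.List.len (b :: t) - 1) 0 (-1))
            = none) :
    pvFindPivotA (a :: b :: t) (PySem.List.pyRange (PySem.List.len (a :: b :: t) - 1) 0 (-1))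
      = if b < a then some 1 else none := by
  have hL1 : PySem.List.len (a :: b :: t) - 1 = ((t.length : Int)) + 1 := by
    simp only [PySem.List.len_eq, List.length_cons]; omega
  have hL2 : PySem.List.len (b :: t) - 1 = (t.length : Int) := by
    simp [PySem.List.len_eq]
  rw [hL1, pvRange_countdown t.length]
  rw [hL2] at hj
  rw [pvFindPivotA_append_none _ _ _ (by
    rw [pvFindPivotA_map_shift a (b :: t) _
      (fun x hx => by rw [PySem.List.mem_pyRange_neg_one] at hx; omega), hj]
    rfl)]
  rw [pvFindPivotA]
  rw [show (1 : Int) - 1 = 0 from rfl, pvGet_zero_cons, pvGet_one_cons]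
  simp only [gt_iff_lt, pvFindPivotA]

theorem pvFoldlChoice (F : Int → Int → Int) (hF : ∀ li j, F li j = j ∨ F li j = li) :
    ∀ (r : List Int) (li : Int), r.foldl F li = li ∨ r.foldl F li ∈ r := by
  intro r
  induction r with
  | nil => intro li; left; rfl
  | cons x r ih =>
    intro li
    rcases ih (F li x) with h | h
    · rcases hF li x with h2 | h2
      · right; rw [List.foldl_cons, h, h2]; exact List.mem_cons_self ..
      · left; rw [List.foldl_cons, h, h2]
    · right; exact List.mem_cons_of_mem _ (by rw [List.foldl_cons]; exact h)

theorem pvLargestIndex_choice (d : List Int) (i : Int) :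
    pvLargestIndex d i = i ∨ pvLargestIndex d i ∈ PySem.List.pyRange i (PySem.List.len d) 1 := by
  apply pvFoldlChoice
  intro li j
  split_ifs
  · left; rfl
  · right; rfl

theorem pvJloopVal (d : List Int) (piv : Int) :
    ∀ (r : List Int) (li : Int),
      pvGet d (r.foldl
          (fun li j => if pvGet d piv > pvGet d j ∧ pvGet d j > pvGet d li then j else li) li)
        = (r.map (fun j => pvGet d j)).foldl
            (fun v y => if pvGet d piv > y ∧ y > v then y else v) (pvGet d li) := by
  intro r
  induction r with
  | nil => intro li; rfl
  | cons x r ih =>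
    intro li
    rw [List.map_cons, List.foldl_cons, List.foldl_cons]
    by_cases hc : pvGet d piv > pvGet d x ∧ pvGet d x > pvGet d li
    · rw [if_pos hc, if_pos hc, ih]
    · rw [if_neg hc, if_neg hc, ih]

theorem pvThreshMax (A : Int) :
    ∀ (t : List Int) (v : Int),
      t.foldl (fun v y => if A > y ∧ y > v then y else v) v
        = (t.filter (fun y => decide (y < A))).foldl max v := by
  intro t
  induction t with
  | nil => intro v; rfl
  | cons y t ih =>
    intro v
    rw [List.foldl_cons]
    by_cases hy : y < A
    · rw [List.filter_cons_of_pos (by simpa using hy), List.foldl_cons, ih]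
      congr 1
      by_cases hv : y > v
      · rw [if_pos (by omega)]; omega
      · rw [if_neg (by omega)]; omega
    · rw [List.filter_cons_of_neg (by simpa using hy), ih]
      congr 1
      rw [if_neg (by omega)]

theorem pvFoldlMaxComm : ∀ (l : List Int) (v c : Int),
    l.foldl max (max v c) = max v (l.foldl max c) := by
  intro l
  induction l with
  | nil => intro v c; rfl
  | cons x l ih =>
    intro v c
    rw [List.foldl_cons, List.foldl_cons, max_assoc, ih]

theorem pvFoldlMaxMem (c : Int) (rest : List Int) (v : Int) (hv : v ∈ c :: rest) :
    (c :: rest).foldl max v = rest.foldl max c := by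
  rw [List.foldl_cons, pvFoldlMaxComm]
  have hle : v ≤ rest.foldl max c := by
    rcases List.mem_cons.1 hv with rfl | hv
    · exact (PySem.List.le_foldl_max rest v).1
    · exact (PySem.List.le_foldl_max rest c).2 v hv
  omega

theorem pvEraseIdxPermErase :
    ∀ (l : List Int) (k : Nat) (m : Int), (h : k < l.length) → l[k] = m →
      (l.eraseIdx k).Perm (l.erase m) := by
  intro l
  induction l with
  | nil => intro k m h; simp at h
  | cons c s ih =>
    intro k m h hk
    cases k with
    | zero =>
      simp at hk
      subst hk
      simp [List.erase_cons_head]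
    | succ k =>
      simp at h hk
      by_cases hcm : c = m
      · subst hcm
        rw [List.eraseIdx_cons_succ, List.erase_cons_head]
        have hs : s = s.take k ++ c :: s.drop (k + 1) := by
          conv_lhs => rw [← List.take_append_drop k s]
          rw [List.drop_eq_getElem_cons h, hk]
        have he : s.eraseIdx k = s.take k ++ s.drop (k + 1) := List.eraseIdx_eq_take_drop_succ ..
        have h1 : (c :: s.eraseIdx k).Perm (s.take k ++ c :: s.drop (k + 1)) := by
          rw [he]; exact List.perm_middle.symm
        conv_rhs => rw [hs]
        exact h1
      · rw [List.eraseIdx_cons_succ, List.erase_cons_tail (by simp [hcm])]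
        exact (ih k m h hk).cons c

theorem pvSetPerm (l : List Int) (k : Nat) (a m : Int) (h : k < l.length) (hm : l[k] = m) :
    (l.set k a).Perm (l.erase m ++ [a]) := by
  have h1 : l.set k a = l.take k ++ a :: l.drop (k + 1) := List.set_eq_take_cons_drop a h
  have h2 : l.eraseIdx k = l.take k ++ l.drop (k + 1) := List.eraseIdx_eq_take_drop_succ ..
  have p1 : (l.set k a).Perm (a :: l.eraseIdx k) := by
    rw [h1, h2]; exact List.perm_middle
  have p2 : (a :: l.eraseIdx k).Perm (a :: l.erase m) := (pvEraseIdxPermErase l k m h hm).cons a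
  have p3 : (a :: l.erase m).Perm (l.erase m ++ [a]) := (List.perm_append_singleton a _).symm
  exact (p1.trans p2).trans p3

theorem pvSortedRevCongr (xs ys : List Int) (h : xs.Perm ys) :
    PySem.List.sorted xs (fun x => x) true = PySem.List.sorted ys (fun x => x) true := by
  haveI : Std.Antisymm (fun a b : Int => b ≤ a) := ⟨fun a b h1 h2 => le_antisymm h2 h1⟩
  apply List.Perm.eq_of_pairwise' (r := fun a b : Int => b ≤ a)
  · exact PySem.List.sorted_pairwise_rev xs (fun x => x)
  · exact PySem.List.sorted_pairwise_rev ys (fun x => x)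
  · exact (PySem.List.sorted_perm xs (fun x => x) true).trans
      (h.trans (PySem.List.sorted_perm ys (fun x => x) true).symm)

theorem pvSetD_cons (c : Int) (l : List Int) (x : Int) (hx : 0 ≤ x) (v : Int) :
    PySem.List.pySetD (c :: l) (x + 1) v = c :: PySem.List.pySetD l x v := by
  rw [PySem.List.pySetD_of_nonneg _ _ (show (0 : Int) ≤ x + 1 by omega),
    PySem.List.pySetD_of_nonneg _ _ hx]
  rw [show (x + 1).toNat = x.toNat + 1 by omega]
  rfl

theorem pvJloopShift (c : Int) (d : List Int) (p : Int) (hp : (1 : Int) ≤ p) :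
    ∀ (r : List Int), (∀ x ∈ r, (1 : Int) ≤ x) → ∀ li, (1 : Int) ≤ li →
      (r.map (· + 1)).foldl
        (fun l2 j2 => if pvGet (c :: d) (p + 1 - 1) > pvGet (c :: d) j2 ∧
            pvGet (c :: d) j2 > pvGet (c :: d) l2 then j2 else l2) (li + 1)
      = (r.foldl
          (fun l2 j2 => if pvGet d (p - 1) > pvGet d j2 ∧
              pvGet d j2 > pvGet d l2 then j2 else l2) li) + 1 := by
  intro r
  induction r with
  | nil => intro _ li _; rfl
  | cons x r ih =>
    intro hr li hli
    have hx : (1 : Int) ≤ x := hr x (List.mem_cons_self ..)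
    have e0 : pvGet (c :: d) (p + 1 - 1) = pvGet d (p - 1) := by
      rw [show p + 1 - 1 = (p - 1) + 1 by ring, pvGet_cons c d (p - 1) (by omega)]
    have e1 : pvGet (c :: d) (x + 1) = pvGet d x := pvGet_cons c d x (by omega)
    have e2 : pvGet (c :: d) (li + 1) = pvGet d li := pvGet_cons c d li (by omega)
    rw [List.map_cons, List.foldl_cons, List.foldl_cons]
    by_cases hc : pvGet d (p - 1) > pvGet d x ∧ pvGet d x > pvGet d li
    · rw [if_pos (by rw [e0, e1, e2]; exact hc), if_pos hc]
      exact ih (fun y hy => hr y (List.mem_cons_of_mem _ hy)) x hx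
    · rw [if_neg (by rw [e0, e1, e2]; exact hc), if_neg hc]
      exact ih (fun y hy => hr y (List.mem_cons_of_mem _ hy)) li hli

theorem pvLargestIndex_cons (c : Int) (d : List Int) (j : Int) (hj : (1 : Int) ≤ j) :
    pvLargestIndex (c :: d) (j + 1) = pvLargestIndex d j + 1 := by
  unfold pvLargestIndex
  rw [pvLen_cons, pvRange_shift]
  exact pvJloopShift c d j hj _
    (fun x hx => by rw [PySem.List.mem_pyRange_one] at hx; omega) j hj

theorem pvLargestIndex_ge (d : List Int) (i : Int) (hi : (1 : Int) ≤ i) :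
    i ≤ pvLargestIndex d i := by
  rcases pvLargestIndex_choice d i with h | h
  · omega
  · rw [PySem.List.mem_pyRange_one] at h; omega

theorem pvSwapped_cons (c : Int) (d : List Int) (j : Int) (hj : (1 : Int) ≤ j) :
    pvSwapped (c :: d) (j + 1) = c :: pvSwapped d j := by
  have hL : (1 : Int) ≤ pvLargestIndex d j := le_trans hj (pvLargestIndex_ge d j hj)
  unfold pvSwapped
  rw [pvLargestIndex_cons c d j hj]
  have e0 : pvGet (c :: d) (j + 1 - 1) = pvGet d (j - 1) := by
    rw [show j + 1 - 1 = (j - 1) + 1 by ring, pvGet_cons c d (j - 1) (by omega)]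
  have e1 : pvGet (c :: d) (pvLargestIndex d j + 1) = pvGet d (pvLargestIndex d j) :=
    pvGet_cons c d _ (by omega)
  rw [e0, e1, pvSetD_cons c d (pvLargestIndex d j) (by omega)]
  rw [show j + 1 - 1 = (j - 1) + 1 by ring]
  rw [pvSetD_cons c _ (j - 1) (by omega)]

theorem pvSliceTo_cons (c : Int) (l : List Int) (j : Int) (hj : (0 : Int) ≤ j) :
    PySem.List.slice (c :: l) none (some (j + 1)) = c :: PySem.List.slice l none (some j) := by
  rw [PySem.List.slice_to _ (show (0 : Int) ≤ j + 1 by omega), PySem.List.slice_to _ hj]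
  rw [show (j + 1).toNat = j.toNat + 1 by omega]
  rfl

theorem pvSliceFrom_cons (c : Int) (l : List Int) (j : Int) (hj : (0 : Int) ≤ j) :
    PySem.List.slice (c :: l) (some (j + 1)) none = PySem.List.slice l (some j) none := by
  rw [PySem.List.slice_from _ (show (0 : Int) ≤ j + 1 by omega), PySem.List.slice_from _ hj]
  rw [show (j + 1).toNat = j.toNat + 1 by omega]
  rfl

theorem pvAconstruct_cons (c : Int) (d : List Int) (j : Int) (hj : (1 : Int) ≤ j) :
    pvAconstruct (c :: d) (j + 1) = c :: pvAconstruct d j := by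
  unfold pvAconstruct
  rw [pvSwapped_cons c d j hj, pvSliceTo_cons c _ j (by omega),
    pvSliceFrom_cons c _ j (by omega), List.cons_append]

theorem pvNoPivotMin (b : Int) (t : List Int)
    (h : pvFindPivotA (b :: t) (PySem.List.pyRange (PySem.List.len (b :: t) - 1) 0 (-1)) = none) :
    ∀ x ∈ b :: t, b ≤ x := by
  have hnd := (pvFindPivotA_none_iff _ _).1 h
  have hadj : ∀ k : Nat, k + 1 < (b :: t).length →
      (b :: t).getD k 0 ≤ (b :: t).getD (k + 1) 0 := by
    intro k hk
    have hmem : ((k : Int) + 1) ∈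
        PySem.List.pyRange (PySem.List.len (b :: t) - 1) 0 (-1) := by
      rw [PySem.List.mem_pyRange_neg_one]
      simp only [PySem.List.len_eq, List.length_cons] at *
      omega
    have hthis := hnd _ hmem
    rw [show (k : Int) + 1 - 1 = (k : Int) by ring] at hthis
    rw [show (k : Int) + 1 = ((k + 1 : Nat) : Int) by push_cast; ring] at hthis
    simp only [pvGet, PySem.List.pyGetD_natCast] at hthis
    omega
  have hmono : ∀ k : Nat, k < (b :: t).length → b ≤ (b :: t).getD k 0 := by
    intro k
    induction k with
    | zero => intro _; simp [List.getD]
    | succ k ih => intro hk; exact le_trans (ih (by omega)) (hadj k hk)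
  intro x hx
  obtain ⟨i, hi, rfl⟩ := List.mem_iff_getElem.1 hx
  have hb := hmono i hi
  rwa [List.getD_eq_getElem _ _ hi] at hb

theorem pvBase (a b : Int) (t : List Int) (hab : b < a) :
    ∃ M : Int,
      PySem.List.max? ((b :: t).filter (fun x => decide (x < a))) (fun x => x) = some M ∧
      pvAconstruct (a :: b :: t) 1
        = M :: PySem.List.sorted (((PySem.List.remove? (b :: t) M).getD (b :: t)) ++ [a])
            (fun x => x) true := by
  have hbs : b ∈ (b :: t).filter (fun x => decide (x < a)) := by
    simp [hab]
  obtain ⟨cc, rest, hsm⟩ : ∃ cc rest,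
      (b :: t).filter (fun x => decide (x < a)) = cc :: rest := by
    cases hf : (b :: t).filter (fun x => decide (x < a)) with
    | nil => rw [hf] at hbs; simp at hbs
    | cons cc r => exact ⟨cc, r, rfl⟩
  refine ⟨rest.foldl max cc, by rw [hsm, PySem.List.max?_id_cons], ?_⟩
  have hlen : PySem.List.len (a :: b :: t) = ((t.length : Int)) + 2 := by
    simp only [PySem.List.len_eq, List.length_cons]; omega
  have hlib : (1 : Int) ≤ pvLargestIndex (a :: b :: t) 1 ∧
      pvLargestIndex (a :: b :: t) 1 < (t.length : Int) + 2 := by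
    rcases pvLargestIndex_choice (a :: b :: t) 1 with h | h
    · rw [h]; constructor <;> omega
    · rw [PySem.List.mem_pyRange_one, hlen] at h; exact ⟨h.1, h.2⟩
  have hval : pvGet (a :: b :: t) (pvLargestIndex (a :: b :: t) 1) = rest.foldl max cc := by
    unfold pvLargestIndex
    rw [pvJloopVal (a :: b :: t) (1 - 1)]
    have hmap : (PySem.List.pyRange 1 (PySem.List.len (a :: b :: t)) 1).map
        (fun j => pvGet (a :: b :: t) j) = b :: t := by
      simp only [pvGet]
      rw [PySem.List.map_pyGetD_pyRange _ 0 (show (0 : Int) ≤ 1 by norm_num)]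
      rfl
    rw [hmap, show (1 : Int) - 1 = 0 by norm_num, pvGet_zero_cons, pvGet_one_cons]
    rw [pvThreshMax a (b :: t) b, hsm]
    exact pvFoldlMaxMem cc rest b (hsm ▸ hbs)
  obtain ⟨k, hk1⟩ : ∃ k, (pvLargestIndex (a :: b :: t) 1).toNat = k + 1 :=
    ⟨(pvLargestIndex (a :: b :: t) 1).toNat - 1, by omega⟩
  have hkt : k < (b :: t).length := by
    simp only [List.length_cons]; omega
  have hgk : (b :: t)[k] = rest.foldl max cc := by
    have hge : (a :: b :: t).getD (pvLargestIndex (a :: b :: t) 1).toNat 0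
        = rest.foldl max cc := by
      rw [← hval]
      simp only [pvGet]
      rw [PySem.List.pyGetD_eq_getElem _ 0 (by omega)
        (by simp only [List.length_cons]; omega)]
      rw [List.getD_eq_getElem _ _ (by simp only [List.length_cons]; omega)]
    rw [hk1, List.getD_cons_succ] at hge
    rwa [List.getD_eq_getElem _ _ hkt] at hge
  have hsw : pvSwapped (a :: b :: t) 1 = rest.foldl max cc :: (b :: t).set k a := by
    unfold pvSwapped
    rw [hval, show (1 : Int) - 1 = 0 by norm_num, pvGet_zero_cons]
    rw [PySem.List.pySetD_of_nonneg _ _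
        (show (0 : Int) ≤ pvLargestIndex (a :: b :: t) 1 by omega),
      PySem.List.pySetD_of_nonneg _ _ (le_refl (0 : Int))]
    rw [hk1]
    rfl
  have hM : rest.foldl max cc ∈ b :: t := by
    rw [← hgk]; exact List.getElem_mem hkt
  have hrm : PySem.List.remove? (b :: t) (rest.foldl max cc)
      = some ((b :: t).erase (rest.foldl max cc)) :=
    PySem.List.remove?_eq_some_erase _ _ hM
  unfold pvAconstruct
  rw [hsw, hrm]
  rw [PySem.List.slice_to _ (show (0 : Int) ≤ 1 by norm_num),
    PySem.List.slice_from _ (show (0 : Int) ≤ 1 by norm_num)]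
  simp only [show (1 : Int).toNat = 1 from rfl, List.take_succ_cons, List.take_zero,
    List.drop_succ_cons, List.drop_zero, List.singleton_append, Option.getD_some]
  congr 1
  exact pvSortedRevCongr _ _ (pvSetPerm (b :: t) k a _ hkt hgk)

theorem pvPrevPerm_cons₂ (a b : Int) (t : List Int) :
    pvPrevPerm (a :: b :: t)
      = match pvPrevPerm (b :: t) with
        | some p => some (a :: p)
        | none =>
          match PySem.List.max? ((b :: t).filter (fun x => decide (x < a))) (fun x => x) with
          | none => none
          | some m =>
            some (m :: PySem.List.sorted
              (((PySem.List.remove? (b :: t) m).getD (b :: t)) ++ [a]) (fun x => x) true) := rfl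

theorem pvMain (d : List Int) :
    (pvFindPivotA d (PySem.List.pyRange (PySem.List.len d - 1) 0 (-1))).map (pvAconstruct d)
      = pvPrevPerm d := by
  induction d with
  | nil =>
    rw [show PySem.List.len ([] : List Int) - 1 = -1 by simp [PySem.List.len_eq],
      PySem.List.pyRange_neg_one_eq_nil (by norm_num)]
    rfl
  | cons a t ih =>
    cases t with
    | nil =>
      rw [show PySem.List.len [a] - 1 = 0 by simp [PySem.List.len_eq],
        PySem.List.pyRange_neg_one_eq_nil (by norm_num)]
      rfl
    | cons b t' =>
      rcases hj : pvFindPivotA (b :: t')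
          (PySem.List.pyRange (PySem.List.len (b :: t') - 1) 0 (-1)) with _ | j
      · have ihn : pvPrevPerm (b :: t') = none := by rw [← ih, hj]; rfl
        rw [pvPivotCons_none a b t' hj, pvPrevPerm_cons₂, ihn]
        by_cases hab : b < a
        · obtain ⟨M, hM, hC⟩ := pvBase a b t' hab
          rw [if_pos hab, hM]
          simp only [Option.map_some]
          rw [hC]
        · rw [if_neg hab]
          have hnone : (b :: t').filter (fun x => decide (x < a)) = [] := by
            rw [List.filter_eq_nil_iff]
            intro x hx
            have hbx := pvNoPivotMin b t' hj x hx
            simp only [decide_eq_true_eq]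
            omega
          rw [hnone]
          rfl
      · have hj1 : (1 : Int) ≤ j := by
          have hm := pvFindPivotA_mem _ _ _ hj
          rw [PySem.List.mem_pyRange_neg_one] at hm
          omega
        have ihs : pvPrevPerm (b :: t') = some (pvAconstruct (b :: t') j) := by
          rw [← ih, hj]; rfl
        rw [pvPivotCons_some a b t' j hj, pvPrevPerm_cons₂, ihs]
        simp only [Option.map_some]
        rw [pvAconstruct_cons a (b :: t') j hj1]

-- ===== VERDICT (by name: the statement is the Claim_ definition above) =====
theorem largestNumberSmallerThanN_spec : Claim_equal_largestNumberSmallerThanN := by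
  intro n _ _
  unfold Spec_largestNumberSmallerThanN largestNumberSmallerThanN largestNumberSmallerThanN_alt
  have h := pvMain (pvDigits n)
  cases hfp : pvFindPivotA (pvDigits n)
      (PySem.List.pyRange (PySem.List.len (pvDigits n) - 1) 0 (-1)) with
  | none => rw [← h]; simp only [hfp, Option.map_none]
  | some i => rw [← h]; simp only [hfp, Option.map_some]
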